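-- pv_equiv track=rewrite | github.com/JeSmyrna/SoftRes-Helper | scripts/sr_sheet_manager_func.py | find_double_chars
-- ===== SOURCE A (Python) =====
-- def find_double_chars(attendeese:list,player_dict:dict) -> list:
--
--     dict_keys = list(player_dict.keys())
--     dict_keys.sort()
--     new_player_dict = {}
--     for key in dict_keys:
--         char_list = str(player_dict.get(key)).split('.')
--         new_player_dict.update({key:char_list})
--
--     no_doubles = []
--     for attendee in attendeese:
--         for char_list in new_player_dict:
--             if attendee in new_player_dict[char_list]:
--                 if new_player_dict[char_list][-1] != True:
--                     no_doubles.append(attendee)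
--                     add_bool_list = new_player_dict[char_list].append(True)
--                 else:
--                     pass
--     return no_doubles
-- ===== SOURCE B (Python) =====
-- def find_double_chars(attendeese: list, player_dict: dict) -> list:
--     # Precompute char -> matching player keys (keys in sorted order, each key
--     # at most once per char); then each attendee only visits its own matches.
--     index = {}
--     for key in sorted(player_dict):
--         for ch in dict.fromkeys(str(player_dict[key]).split('.')):
--             index.setdefault(ch, []).append(key)
--     used = set()
--     no_doubles = []
--     for attendee in attendeese:
--         for key in index.get(attendee, ()):
--             if key not in used:
--                 used.add(key)
--                 no_doubles.append(attendee)
--     return no_doubles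
-- ===== Notes on version B (the rewrite author's own statement) =====
-- stated objective: faster
-- what changed: B builds a char->sorted-player-keys index once (deduplicating each player's char list) and keeps a 'used' set, so each attendee only visits its own matching players instead of A's rescan of every player's whole char list per attendee.
import Mathlib
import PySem

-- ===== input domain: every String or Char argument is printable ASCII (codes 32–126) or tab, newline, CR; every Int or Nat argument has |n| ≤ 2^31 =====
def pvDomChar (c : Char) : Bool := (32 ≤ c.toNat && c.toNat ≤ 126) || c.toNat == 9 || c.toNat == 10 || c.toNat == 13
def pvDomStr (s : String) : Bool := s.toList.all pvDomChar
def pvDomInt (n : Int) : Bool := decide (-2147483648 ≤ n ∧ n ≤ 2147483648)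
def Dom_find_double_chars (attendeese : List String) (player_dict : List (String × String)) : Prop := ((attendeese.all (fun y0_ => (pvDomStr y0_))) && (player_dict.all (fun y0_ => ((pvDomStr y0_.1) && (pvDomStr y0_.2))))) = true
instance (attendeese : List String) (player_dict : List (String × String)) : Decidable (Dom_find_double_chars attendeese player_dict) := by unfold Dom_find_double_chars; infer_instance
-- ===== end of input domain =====

-- B replaces A's scan of every player for every attendee by a char→players index built once,
-- so each attendee only visits its own matching players (objective: faster, asymptotic).

-- ===== PORT A =====
-- Notes on faithfulness of the A port:
--  * `str(player_dict.get(key))`: `key` is always a key of the dict, so `.get` returns its value,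
--    a str, and `str()` is the identity on it — ported as `getD key ""` (the default is never hit).
--  * `.split('.')` has a nonempty separator, so `PySem.Str.split?` is always `some` — `.getD []`
--    never hits its default.
--  * A may append Python's `True` to a char list; the attendee (a str) never equals `True` and the
--    split list is nonempty, so the heterogeneous list is modelled exactly by the pair
--    (string parts, True-appended flag): `attendee in char_list` tests the parts and
--    `char_list[-1] != True` is the flag being false.
def find_double_chars (attendeese : List String) (player_dict : List (String × String)) : List String :=
  let pd := PySem.Dict.ofList player_dict
  -- dict_keys = list(player_dict.keys()); dict_keys.sort()
  let dict_keys := PySem.List.sorted pd.keys (fun k => k)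
  -- new_player_dict = {}; for key in dict_keys: new_player_dict.update({key: char_list})
  let npd : PySem.Dict String (List String × Bool) :=
    dict_keys.foldl (fun m key =>
      m.insert key ((PySem.Str.split? (pd.getD key "") ".").getD [], false)) PySem.Dict.empty
  -- no_doubles = []; nested attendee/key loops (the dict's keys never change during the loop)
  (attendeese.foldl (fun (st : List String × PySem.Dict String (List String × Bool)) attendee =>
      st.2.keys.foldl (fun (st : List String × PySem.Dict String (List String × Bool)) key =>
        let entry := st.2.getD key ([], false)
        if attendee ∈ entry.1 then
          if entry.2 ≠ true then
            (st.1 ++ [attendee], st.2.insert key (entry.1, true))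
          else st
        else st) st)
    ([], npd)).1

-- ===== PORT B =====
-- `dict.fromkeys(...)` (ordered dedup) is PySem.List.dedup; `index.setdefault(ch, []).append(key)`
-- is `insert ch (getD ch [] ++ [key])` (same position semantics); `used` is a Python set of strings.
def find_double_chars_alt (attendeese : List String) (player_dict : List (String × String)) : List String :=
  let pd := PySem.Dict.ofList player_dict
  let index : PySem.Dict String (List String) :=
    (PySem.List.sorted pd.keys (fun k => k)).foldl (fun idx key =>
      (PySem.List.dedup ((PySem.Str.split? (pd.getD key "") ".").getD [])).foldl
        (fun idx ch => idx.insert ch (idx.getD ch [] ++ [key])) idx) PySem.Dict.empty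
  (attendeese.foldl (fun (st : List String × PySem.Set String) attendee =>
      (index.getD attendee []).foldl (fun (st : List String × PySem.Set String) key =>
        if st.2.contains key then st
        else (st.1 ++ [attendee], st.2.add key)) st)
    ([], PySem.Set.empty)).1

-- ===== PRECONDITION & SPEC =====
def Spec_find_double_chars (attendeese : List String) (player_dict : List (String × String)) (out : List String) : Prop := out = find_double_chars_alt attendeese player_dict
instance (attendeese : List String) (player_dict : List (String × String)) (out : List String) : Decidable (Spec_find_double_chars attendeese player_dict out) := by unfold Spec_find_double_chars; infer_instance

-- ===== CLAIM (what is proved, stated in full; the proofs are below) =====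
def Claim_equal_find_double_chars : Prop := ∀ (attendeese : List String) (player_dict : List (String × String)), Dom_find_double_chars attendeese player_dict → Spec_find_double_chars attendeese player_dict (find_double_chars attendeese player_dict)

-- ===== LEMMAS AND PROOFS =====

-- B's inner loop over a duplicate-free list of keys: appends `attendee` once per not-yet-used key
-- and adds every key of the list to `used`.
lemma fdc_foldB (attendee : String) (M : List String) (hM : M.Nodup)
    (out : List String) (used : PySem.Set String) :
    M.foldl (fun (st : List String × PySem.Set String) key =>
        if st.2.contains key then st
        else (st.1 ++ [attendee], st.2.add key)) (out, used)
      = (out ++ (M.filter (fun k => !used.contains k)).map (fun _ => attendee),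
         PySem.Set.update used M) := by
  induction M generalizing out used with
  | nil => simp [PySem.Set.update]
  | cons m t ih =>
    have hmt : m ∉ t := by simp_all
    have hnd : t.Nodup := hM.of_cons
    by_cases h : used.contains m = true
    · have hadd : used.add m = used := by
        simp only [PySem.Set.add, h]; simp
      simp only [List.foldl_cons, List.filter_cons, h, Bool.not_true, if_true, if_false,
        Bool.false_eq_true, PySem.Set.update, List.foldl_cons, hadd]
      simpa [PySem.Set.update] using ih hnd out used
    · have h' : used.contains m = false := by simpa using h
      simp only [List.foldl_cons, h', Bool.not_false, List.filter_cons,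
        PySem.Set.update, List.foldl_cons, Bool.false_eq_true, if_false, if_true]
      rw [ih hnd (out ++ [attendee]) (used.add m)]
      have hf : t.filter (fun k => !(used.add m).contains k) = t.filter (fun k => !used.contains k) := by
        apply List.filter_congr
        intro k hk
        have : (used.add m).contains k = used.contains k := by
          have hkm : k ≠ m := fun e => hmt (e ▸ hk)
          simp [PySem.Set.contains, PySem.Set.mem_add, hkm]
        rw [this]
      rw [hf]
      simp [PySem.Set.update]

-- building B's index: the bucket of `ch` collects, in order, the keys whose char list contains `ch`.
lemma fdc_idx_inner (key : String) (cs : List String) (hcs : cs.Nodup)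
    (idx : PySem.Dict String (List String)) (ch : String) :
    (cs.foldl (fun idx ch => idx.insert ch (idx.getD ch [] ++ [key])) idx).getD ch []
      = idx.getD ch [] ++ (if ch ∈ cs then [key] else []) := by
  induction cs generalizing idx with
  | nil => simp
  | cons c t ih =>
    have hct : c ∉ t := by simp_all
    have hnd : t.Nodup := hcs.of_cons
    simp only [List.foldl_cons]
    rw [ih hnd]
    by_cases h : ch = c
    · subst h
      rw [PySem.Dict.getD_insert]
      simp [hct]
    · rw [PySem.Dict.getD_insert]
      simp [h, List.mem_cons]
lemma fdc_idx_build (f : String → List String) (K : List String)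
    (idx : PySem.Dict String (List String)) (ch : String) :
    (K.foldl (fun idx key =>
        (PySem.List.dedup (f key)).foldl
          (fun idx ch => idx.insert ch (idx.getD ch [] ++ [key])) idx) idx).getD ch []
      = idx.getD ch [] ++ K.filter (fun k => decide (ch ∈ f k)) := by
  induction K generalizing idx with
  | nil => simp
  | cons k t ih =>
    simp only [List.foldl_cons, List.filter_cons]
    rw [ih]
    rw [fdc_idx_inner k _ (PySem.List.nodup_dedup (f k))]
    by_cases h : ch ∈ f k
    · simp [h]
    · simp [h]

-- A's inner loop over the (duplicate-free) key list: appends `attendee` once per matching unmarked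
-- key, marks every matching key, and never changes the key list or the char lists.
lemma fdc_foldA (attendee : String) (f : String → List String) (m : String → Bool)
    (L : List String) (hL : L.Nodup) (out : List String)
    (d : PySem.Dict String (List String × Bool))
    (hc : ∀ k ∈ L, d.contains k = true)
    (hd : ∀ k ∈ L, d.getD k ([], false) = (f k, m k)) :
    (L.foldl (fun (st : List String × PySem.Dict String (List String × Bool)) key =>
        let entry := st.2.getD key ([], false)
        if attendee ∈ entry.1 then
          if entry.2 ≠ true then
            (st.1 ++ [attendee], st.2.insert key (entry.1, true))
          else st
        else st) (out, d)).1
        = out ++ (L.filter (fun k => decide (attendee ∈ f k) && !m k)).map (fun _ => attendee)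
    ∧ (L.foldl (fun (st : List String × PySem.Dict String (List String × Bool)) key =>
        let entry := st.2.getD key ([], false)
        if attendee ∈ entry.1 then
          if entry.2 ≠ true then
            (st.1 ++ [attendee], st.2.insert key (entry.1, true))
          else st
        else st) (out, d)).2.keys = d.keys
    ∧ ∀ k, (L.foldl (fun (st : List String × PySem.Dict String (List String × Bool)) key =>
        let entry := st.2.getD key ([], false)
        if attendee ∈ entry.1 then
          if entry.2 ≠ true then
            (st.1 ++ [attendee], st.2.insert key (entry.1, true))
          else st
        else st) (out, d)).2.getD k ([], false)
          = if k ∈ L ∧ attendee ∈ f k then (f k, true) else d.getD k ([], false) := by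
  induction L generalizing out d with
  | nil => simp
  | cons l t ih =>
    have hlt : l ∉ t := by simp_all
    have hnd : t.Nodup := hL.of_cons
    have hdl : d.getD l ([], false) = (f l, m l) := hd l (by simp)
    simp only [List.foldl_cons, hdl]
    by_cases hmem : attendee ∈ f l
    · by_cases hml : m l = true
      · -- marked already: state unchanged
        simp only [hmem, if_pos, hml, ne_eq, not_true_eq_false, if_false]
        obtain ⟨h1, h2, h3⟩ := ih hnd out d (fun k hk => hc k (by simp [hk])) (fun k hk => hd k (by simp [hk]))
        refine ⟨?_, h2, ?_⟩
        · rw [h1]; simp [hmem, hml]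
        · intro k
          rw [h3]
          by_cases hkl : k = l
          · subst hkl
            simp [hlt, hmem, hdl, hml]
          · simp [List.mem_cons, hkl]
      · -- unmarked: append and mark
        have hml' : m l = false := by simpa using hml
        simp only [hmem, hml', ne_eq, Bool.false_eq_true, not_false_eq_true, if_true]
        set d' := d.insert l (f l, true) with hd'
        have hc' : ∀ k ∈ t, d'.contains k = true := by
          intro k hk
          rw [hd', PySem.Dict.contains_insert]
          simp [hc k (by simp [hk])]
        have hgd' : ∀ k ∈ t, d'.getD k ([], false) = (f k, m k) := by
          intro k hk
          have hkl : k ≠ l := fun e => hlt (e ▸ hk)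
          rw [hd', PySem.Dict.getD_insert]
          simp [hkl, hd k (by simp [hk])]
        obtain ⟨h1, h2, h3⟩ := ih hnd (out ++ [attendee]) d' hc' hgd'
        have hkeys : d'.keys = d.keys :=
          PySem.Dict.keys_insert_of_contains d _ (hc l (by simp))
        refine ⟨?_, by rw [h2, hkeys], ?_⟩
        · rw [h1]; simp [hmem, hml']
        · intro k
          rw [h3]
          by_cases hkl : k = l
          · subst hkl
            simp only [List.mem_cons, true_or, hmem, and_true, if_true]
            rw [hd', PySem.Dict.getD_insert]
            simp
          · rw [hd', PySem.Dict.getD_insert]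
            simp [hkl, List.mem_cons]
    · -- attendee not in char list: unchanged
      simp only [hmem, if_false]
      obtain ⟨h1, h2, h3⟩ := ih hnd out d (fun k hk => hc k (by simp [hk])) (fun k hk => hd k (by simp [hk]))
      refine ⟨?_, h2, ?_⟩
      · rw [h1]; simp [hmem]
      · intro k
        rw [h3]
        by_cases hkl : k = l
        · subst hkl; simp [hlt, hmem]
        · simp [List.mem_cons, hkl]

-- the two outer loops in lockstep: A's dict marks coincide with B's `used` set.
lemma fdc_mainloop (f : String → List String) (K : List String) (hK : K.Nodup)
    (index : PySem.Dict String (List String))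
    (hidx : ∀ ch, index.getD ch [] = K.filter (fun k => decide (ch ∈ f k)))
    (ats out : List String) (d : PySem.Dict String (List String × Bool))
    (used : PySem.Set String)
    (hkeys : d.keys = K)
    (hd : ∀ k ∈ K, d.getD k ([], false) = (f k, used.contains k)) :
    (ats.foldl (fun (st : List String × PySem.Dict String (List String × Bool)) attendee =>
        st.2.keys.foldl (fun (st : List String × PySem.Dict String (List String × Bool)) key =>
          let entry := st.2.getD key ([], false)
          if attendee ∈ entry.1 then
            if entry.2 ≠ true then
              (st.1 ++ [attendee], st.2.insert key (entry.1, true))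
            else st
          else st) st) (out, d)).1
      = (ats.foldl (fun (st : List String × PySem.Set String) attendee =>
          (index.getD attendee []).foldl (fun (st : List String × PySem.Set String) key =>
            if st.2.contains key then st
            else (st.1 ++ [attendee], st.2.add key)) st) (out, used)).1 := by
  induction ats generalizing out d used with
  | nil => rfl
  | cons a t ih =>
    simp only [List.foldl_cons]
    have hc : ∀ k ∈ K, d.contains k = true := by
      intro k hk
      rw [PySem.Dict.contains_iff_mem_keys, hkeys]; exact hk
    obtain ⟨h1, h2, h3⟩ := fdc_foldA a f (fun k => used.contains k) K hK out d hc hd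
    have hM : (K.filter (fun k => decide (a ∈ f k))).Nodup := hK.filter _
    -- rewrite the fold bases
    have hkd : ((out, d) : List String × PySem.Dict String (List String × Bool)).2.keys = K := hkeys
    rw [hkd, hidx a, fdc_foldB a _ hM out used]
    set pA := K.foldl (fun (st : List String × PySem.Dict String (List String × Bool)) key =>
        let entry := st.2.getD key ([], false)
        if a ∈ entry.1 then
          if entry.2 ≠ true then
            (st.1 ++ [a], st.2.insert key (entry.1, true))
          else st
        else st) (out, d) with hpA
    have hfilt : (K.filter (fun k => decide (a ∈ f k))).filter (fun k => !used.contains k)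
        = K.filter (fun k => decide (a ∈ f k) && !used.contains k) := by
      rw [List.filter_filter]
      exact List.filter_congr (fun k _ => by rw [Bool.and_comm])
    have houts : out ++ ((K.filter (fun k => decide (a ∈ f k))).filter
        (fun k => !used.contains k)).map (fun _ => a) = pA.1 := by
      rw [hfilt, h1]
    have hd' : ∀ k ∈ K, pA.2.getD k ([], false)
        = (f k, (PySem.Set.update used (K.filter (fun k => decide (a ∈ f k)))).contains k) := by
      intro k hk
      have hcu : (PySem.Set.update used (K.filter (fun k => decide (a ∈ f k)))).contains k
          = (used.contains k || decide (a ∈ f k)) := by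
        by_cases h1' : k ∈ used <;> by_cases h2' : a ∈ f k <;>
          simp [PySem.Set.contains, PySem.Set.mem_update, List.mem_filter, hk, h1', h2']
      rw [h3 k, hcu]
      by_cases hm : a ∈ f k
      · simp [hk, hm]
      · simp [hk, hm, hd k hk]
    rw [houts]
    exact ih pA.1 pA.2 _ (by rw [h2, hkeys]) hd'

-- assembly: instantiate the loop lemmas with the actual key list, char lists and index.
theorem fdc_main (attendeese : List String) (player_dict : List (String × String)) :
    find_double_chars attendeese player_dict = find_double_chars_alt attendeese player_dict := by
  unfold find_double_chars find_double_chars_alt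
  have hK : (PySem.List.sorted (PySem.Dict.ofList player_dict).keys (fun k => k)).Nodup :=
    (PySem.List.sorted_perm (PySem.Dict.ofList player_dict).keys (fun k => k) false).symm.nodup
      (PySem.Dict.nodup_keys_ofList player_dict)
  set pd := PySem.Dict.ofList player_dict with hpd
  set K := PySem.List.sorted pd.keys (fun k => k) with hKdef
  set f : String → List String := fun k => (PySem.Str.split? (pd.getD k "") ".").getD [] with hf
  set npd : PySem.Dict String (List String × Bool) :=
    K.foldl (fun m key =>
      m.insert key ((PySem.Str.split? (pd.getD key "") ".").getD [], false)) PySem.Dict.empty with hnpd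
  set index : PySem.Dict String (List String) :=
    K.foldl (fun idx key =>
      (PySem.List.dedup ((PySem.Str.split? (pd.getD key "") ".").getD [])).foldl
        (fun idx ch => idx.insert ch (idx.getD ch [] ++ [key])) idx) PySem.Dict.empty with hidxdef
  have hitems : npd.items = K.map (fun k => (k, f k, false)) := by
    rw [hnpd]
    have := PySem.Dict.items_foldl_insert_fresh (l := K) (k := fun x => x)
      (v := fun key => (f key, false)) (d := PySem.Dict.empty)
      (by intro a _; simp) (by simpa using hK)
    simpa [hf] using this
  have hkeys : npd.keys = K := by
    simp [PySem.Dict.keys, hitems, List.map_map, Function.comp_def]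
  have hnd : npd.keys.Nodup := by rw [hkeys]; exact hK
  have hd : ∀ k ∈ K, npd.getD k ([], false) = (f k, PySem.Set.contains PySem.Set.empty k) := by
    intro k hk
    have hmem : (k, f k, false) ∈ npd.items := by
      rw [hitems]; exact List.mem_map.mpr ⟨k, hk, rfl⟩
    rw [PySem.Dict.getD_of_mem_items npd hmem hnd]
    simp [PySem.Set.contains, PySem.Set.empty]
  have hidx : ∀ ch, index.getD ch [] = K.filter (fun k => decide (ch ∈ f k)) := by
    intro ch
    rw [hidxdef]
    have := fdc_idx_build f K PySem.Dict.empty ch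
    simp only [hf] at this ⊢
    rw [this]
    simp
  exact fdc_mainloop f K hK index hidx attendeese [] npd PySem.Set.empty hkeys hd

-- ===== VERDICT (by name: the statement is the Claim_ definition above) =====
theorem find_double_chars_spec : Claim_equal_find_double_chars := by
  intro attendeese player_dict _
  unfold Spec_find_double_chars
  exact fdc_main attendeese player_dict
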